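-- pv_equiv track=rewrite | github.com/GregoryMorse/sudoku | sudoku.py | topological_sort_groups
-- ===== SOURCE A (Python) =====
-- def topological_sort_groups(groups): #dont need to care about circular dependencies
--   unmarked, marked, tempmark, res = groups.copy(), [], [], []
--   def visit(g, res):
--     if g in marked: return
--     if g in tempmark: return #cycle
--     tempmark.append(g)
--     unmarked.remove(g)
--     for gn in groups:
--       if len(g.intersection(gn)) != 0:
--         visit(gn, res)
--     tempmark.remove(g)
--     marked.append(g)
--     res.insert(0, g)
--   while len(unmarked) != 0:
--     visit(unmarked[0], res)
--   return res
-- ===== SOURCE B (Python) =====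
-- def topological_sort_groups(groups):
--     n = len(groups)
--     idx = {}
--     for i, g in enumerate(groups):
--         for e in g:
--             idx[e] = idx.get(e, []) + [i]
--     nbrs = [sorted({j for e in g for j in idx[e]}) for g in groups]
--     seen = set()
--     order = []
--     def dfs(i):
--         if i in seen:
--             return
--         seen.add(i)
--         for j in nbrs[i]:
--             dfs(j)
--         order.append(i)
--     for i in range(n):
--         dfs(i)
--     return [groups[i] for i in reversed(order)]
-- ===== Notes on version B (the rewrite author's own statement) =====
-- stated objective: faster
-- what changed: Replaces A's recursive DFS over set objects (which rescans all groups computing an intersection per visited node and maintains marked/tempmark/unmarked by linear list search and list.remove) with an index-based DFS: a one-pass element-to-group-indices inverted index yields each group's neighbour list up front, visited is an O(1) set of indices, and the result is built by appending finish order and reversing instead of insert(0, ...). Intended as faster; a timing run could not measure a ratio because A timed out at n=16 where B returned.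
import Mathlib
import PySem

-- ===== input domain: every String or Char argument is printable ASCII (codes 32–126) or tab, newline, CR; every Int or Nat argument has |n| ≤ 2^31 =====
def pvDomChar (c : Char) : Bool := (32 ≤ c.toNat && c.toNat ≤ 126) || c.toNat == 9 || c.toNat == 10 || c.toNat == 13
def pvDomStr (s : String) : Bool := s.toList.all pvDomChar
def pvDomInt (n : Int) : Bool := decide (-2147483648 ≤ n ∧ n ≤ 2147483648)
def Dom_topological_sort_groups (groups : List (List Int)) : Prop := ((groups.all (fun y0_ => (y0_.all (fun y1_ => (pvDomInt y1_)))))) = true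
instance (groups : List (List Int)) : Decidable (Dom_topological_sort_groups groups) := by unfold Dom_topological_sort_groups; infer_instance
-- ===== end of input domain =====

-- B replaces A's recursive DFS over set objects (per-node rescan of all groups with an
-- intersection test, marked/tempmark/unmarked kept by linear search and list.remove) with an
-- index-based DFS over neighbour lists precomputed from an element→group-indices inverted
-- index, an O(1)-membership seen set, and a finish-order list reversed at the end (objective:
-- faster; intended as faster — a timing run measured no clean ratio because A timed out
-- at n=16 where B returned). The Python groups are sets; here each set is its list of distinct elements.

-- ===== PORT A =====
-- Python '==' on sets: equality as sets
def pvSetEq (a b : List Int) : Bool :=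
  a.all (fun e => b.contains e) && b.all (fun e => a.contains e)

-- len(g.intersection(gn)) != 0
def pvInter (a b : List Int) : Bool := a.any (fun e => b.contains e)

-- list.remove(g): drop the first element equal (as a set) to g
def pvRemoveFirst (g : List Int) : List (List Int) → List (List Int)
  | [] => []
  | a :: l => if pvSetEq a g then l else a :: pvRemoveFirst g l

structure StA where
  unmarked : List (List Int)
  marked : List (List Int)
  tempmark : List (List Int)
  res : List (List Int)
deriving Repr, DecidableEq

-- visit(g, res); fuel bounds the Python call depth (tempmark members are pairwise
-- set-distinct, so depth ≤ len(groups)+1 and the fuel passed below is never exhausted)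
def visitA (groups : List (List Int)) : Nat → List Int → StA → StA
  | 0, _, st => st
  | f + 1, g, st =>
    if st.marked.any (fun m => pvSetEq g m) then st
    else if st.tempmark.any (fun m => pvSetEq g m) then st
    else
      let st1 : StA := ⟨pvRemoveFirst g st.unmarked, st.marked, st.tempmark ++ [g], st.res⟩
      let st2 := groups.foldl (fun s gn => if pvInter g gn then visitA groups f gn s else s) st1
      ⟨st2.unmarked, st2.marked ++ [g], pvRemoveFirst g st2.tempmark, g :: st2.res⟩

-- while len(unmarked) != 0: visit(unmarked[0], res); each iteration removes unmarked[0]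
-- (on the admitted inputs), so len(groups) iterations suffice
def whileA (groups : List (List Int)) : Nat → StA → List (List Int)
  | 0, st => st.res
  | f + 1, st =>
    match st.unmarked with
    | [] => st.res
    | g :: _ => whileA groups f (visitA groups (groups.length + 1) g st)

def topological_sort_groups (groups : List (List Int)) : List (List Int) :=
  whileA groups groups.length ⟨groups, [], [], []⟩

-- ===== PORT B =====
-- idx: element -> list of indices of groups containing it (Source B: idx[e] = idx.get(e, []) + [i])
def idxB (groups : List (List Int)) : PySem.Dict Int (List Int) :=
  (PySem.List.enumerate groups).foldl
    (fun d p => p.2.foldl (fun d e => d.modify e [] (fun l => l ++ [p.1])) d)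
    PySem.Dict.empty

-- nbrs = [sorted({j for e in g for j in idx[e]}) for g in groups]
def nbrsB (groups : List (List Int)) : List (List Int) :=
  groups.map (fun g =>
    PySem.List.sorted (PySem.Set.ofList (g.flatMap (fun e => (idxB groups).getD e []))) (fun x => x) false)

-- dfs(i): seen/order state; fuel bounds the Python call depth (≤ len(groups)+1, never exhausted)
def dfsB (nbrs : List (List Int)) : Nat → Int → List Int × List Int → List Int × List Int
  | 0, _, sp => sp
  | f + 1, i, sp =>
    if sp.1.contains i then sp
    else
      let sp1 : List Int × List Int := (PySem.Set.add sp.1 i, sp.2)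
      let sp2 := (PySem.List.pyGetD nbrs i []).foldl (fun s j => dfsB nbrs f j s) sp1
      (sp2.1, sp2.2 ++ [i])

def topological_sort_groups_alt (groups : List (List Int)) : List (List Int) :=
  let nbrs := nbrsB groups
  let p := (PySem.List.pyRange 0 (groups.length : Int) 1).foldl
      (fun sp i => dfsB nbrs (groups.length + 1) i sp) ([], [])
  (p.2.reverse).map (fun i => PySem.List.pyGetD groups i [])

-- ===== PRECONDITION & SPEC =====
-- Pre_ excludes lists containing two set-equal groups: there the Python A loops forever
-- (the duplicate stays in unmarked but is already marked, so the while loop never advances).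
def Pre_topological_sort_groups (groups : List (List Int)) : Prop :=
  List.Pairwise (fun a b => pvSetEq a b = false) groups

instance (groups : List (List Int)) : Decidable (Pre_topological_sort_groups groups) := by
  unfold Pre_topological_sort_groups; infer_instance

def pvWitness_topological_sort_groups : List (List Int) := [[1], [2, 3], []]

def Spec_topological_sort_groups (groups : List (List Int)) (out : List (List Int)) : Prop := out = topological_sort_groups_alt groups
instance (groups : List (List Int)) (out : List (List Int)) : Decidable (Spec_topological_sort_groups groups out) := by unfold Spec_topological_sort_groups; infer_instance

-- ===== CLAIM (what is proved, stated in full; the proofs are below) =====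
def Claim_equal_topological_sort_groups : Prop := ∀ (groups : List (List Int)), Dom_topological_sort_groups groups → Pre_topological_sort_groups groups → Spec_topological_sort_groups groups (topological_sort_groups groups)

-- ===== LEMMAS AND PROOFS =====

-- index range of groups, as Python ints
def pvR (groups : List (List Int)) : List Int :=
  PySem.List.pyRange 0 (groups.length : Int) 1

-- the group at index j (as B's final comprehension reads it)
def gof (groups : List (List Int)) (j : Int) : List Int :=
  PySem.List.pyGetD groups j []

-- indices adjacent to index i (in increasing order)
def adjI (groups : List (List Int)) (i : Int) : List Int :=
  (pvR groups).filter (fun j => pvInter (gof groups i) (gof groups j))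

-- simulation invariant between A's state and B's (seen, order) state, with T the indices of
-- A's tempmark (the current recursion path)
structure SimInv (groups : List (List Int)) (st : StA) (seen order T : List Int) : Prop where
  unm : st.unmarked = ((pvR groups).filter (fun j => !seen.contains j)).map (gof groups)
  mar : st.marked = order.map (gof groups)
  tmp : st.tempmark = T.map (gof groups)
  res : st.res = order.reverse.map (gof groups)
  seen_iff : ∀ j, j ∈ seen ↔ j ∈ order ∨ j ∈ T
  nd_order : order.Nodup
  nd_T : T.Nodup
  disj : ∀ j ∈ order, j ∉ T
  ordR : ∀ j ∈ order, j ∈ pvR groups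
  tR : ∀ j ∈ T, j ∈ pvR groups

theorem pvSetEq_refl (a : List Int) : pvSetEq a a = true := by
  simp [pvSetEq, List.all_eq_true]

theorem pvSetEq_comm (a b : List Int) : pvSetEq a b = pvSetEq b a := by
  simp [pvSetEq, Bool.and_comm]

-- Pre_ makes index ↦ group injective up to set equality
theorem mem_pvR {groups : List (List Int)} {i : Int} :
    i ∈ pvR groups ↔ 0 ≤ i ∧ i < (groups.length : Int) := by
  simp [pvR, PySem.List.mem_pyRange_one]

theorem gof_eq {groups : List (List Int)} {i : Int} (hi : i ∈ pvR groups) :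
    gof groups i = groups[i.toNat]'(by
      rcases mem_pvR.mp hi with ⟨h0, h1⟩; omega) := by
  rcases mem_pvR.mp hi with ⟨h0, h1⟩
  exact PySem.List.pyGetD_eq_getElem groups [] h0 h1

theorem pv_inj {groups : List (List Int)} (hpre : Pre_topological_sort_groups groups)
    {i j : Int} (hi : i ∈ pvR groups) (hj : j ∈ pvR groups)
    (h : pvSetEq (gof groups i) (gof groups j) = true) : i = j := by
  rcases mem_pvR.mp hi with ⟨hi0, hi1⟩
  rcases mem_pvR.mp hj with ⟨hj0, hj1⟩
  by_contra hne
  rw [gof_eq hi, gof_eq hj] at h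
  rw [Pre_topological_sort_groups, List.pairwise_iff_getElem] at hpre
  rcases Nat.lt_or_ge i.toNat j.toNat with hlt | hge
  · have := hpre i.toNat j.toNat (by omega) (by omega) hlt
    rw [h] at this; cases this
  · have hlt : j.toNat < i.toNat := by omega
    have := hpre j.toNat i.toNat (by omega) (by omega) hlt
    rw [pvSetEq_comm, h] at this; cases this

theorem pv_ne {groups : List (List Int)} (hpre : Pre_topological_sort_groups groups)
    {i j : Int} (hi : i ∈ pvR groups) (hj : j ∈ pvR groups) (hne : i ≠ j) :
    pvSetEq (gof groups i) (gof groups j) = false := by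
  cases h : pvSetEq (gof groups i) (gof groups j)
  · rfl
  · exact absurd (pv_inj hpre hi hj h) hne

-- membership by set-equality over mapped indices is index membership
theorem pv_any_eq {groups : List (List Int)} (hpre : Pre_topological_sort_groups groups)
    {i : Int} (hi : i ∈ pvR groups) {L : List Int} (hL : ∀ j ∈ L, j ∈ pvR groups) :
    (L.map (gof groups)).any (fun m => pvSetEq (gof groups i) m) = L.contains i := by
  by_cases hmem : i ∈ L
  · rw [List.any_eq_true.mpr ⟨gof groups i, List.mem_map_of_mem hmem, pvSetEq_refl _⟩]
    simp [hmem]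
  · rw [List.any_eq_false.mpr, eq_comm]
    · simpa using hmem
    · rintro m hm
      rcases List.mem_map.mp hm with ⟨j, hj, rfl⟩
      have : i ≠ j := fun he => hmem (he ▸ hj)
      simp [pv_ne hpre hi (hL j hj) this]

-- popping g = groups[i] from tempmark removes exactly the trailing copy
theorem pv_removeFirst_snoc {groups : List (List Int)} (hpre : Pre_topological_sort_groups groups)
    {i : Int} (hi : i ∈ pvR groups) {T : List Int} (hT : ∀ j ∈ T, j ∈ pvR groups)
    (hiT : i ∉ T) :
    pvRemoveFirst (gof groups i) ((T ++ [i]).map (gof groups)) = T.map (gof groups) := by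
  induction T with
  | nil => simp [pvRemoveFirst, pvSetEq_refl]
  | cons a T' ih =>
    have haR : a ∈ pvR groups := hT a List.mem_cons_self
    have hne : a ≠ i := fun he => hiT (he ▸ List.mem_cons_self)
    simp only [List.cons_append, List.map_cons, pvRemoveFirst, pv_ne hpre haR hi hne]
    simp only [Bool.false_eq_true, if_false, List.cons.injEq, true_and]
    exact ih (fun j hj => hT j (List.mem_cons_of_mem _ hj)) (fun hmem => hiT (List.mem_cons_of_mem _ hmem))

-- removing groups[i] from the unmarked list marks i as seen in the filter
theorem pv_removeFirst_filter {groups : List (List Int)} (hpre : Pre_topological_sort_groups groups)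
    {i : Int} (hi : i ∈ pvR groups) (p : Int → Bool) (hp : p i = true) :
    pvRemoveFirst (gof groups i) (((pvR groups).filter p).map (gof groups))
      = ((pvR groups).filter (fun j => p j && !(j == i))).map (gof groups) := by
  have main : ∀ (l : List Int), l.Nodup → (∀ j ∈ l, j ∈ pvR groups) →
      pvRemoveFirst (gof groups i) ((l.filter p).map (gof groups))
        = (l.filter (fun j => p j && !(j == i))).map (gof groups) := by
    intro l
    induction l with
    | nil => intro _ _; rfl
    | cons a l' ih =>
      intro hnd hR
      have hndl' := (List.nodup_cons.mp hnd).2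
      have hal' := (List.nodup_cons.mp hnd).1
      have haR : a ∈ pvR groups := hR a List.mem_cons_self
      have hRl' : ∀ j ∈ l', j ∈ pvR groups := fun j hj => hR j (List.mem_cons_of_mem _ hj)
      by_cases hpa : p a = true
      · by_cases hai : a = i
        · subst hai
          simp only [List.filter_cons, hpa, if_pos, List.map_cons, pvRemoveFirst,
            pvSetEq_refl, if_true, beq_self_eq_true, Bool.not_true, Bool.and_false,
            Bool.false_eq_true, if_false]
          have : l'.filter (fun j => p j && !(j == a)) = l'.filter p := by
            apply List.filter_congr
            intro x hx
            have : x ≠ a := fun he => hal' (he ▸ hx)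
            simp [this]
          rw [this]
        · have hba : (a == i) = false := by simp [hai]
          simp only [List.filter_cons, hpa, if_pos, List.map_cons, pvRemoveFirst,
            pv_ne hpre haR hi hai, Bool.false_eq_true, if_false, hba, Bool.not_false,
            Bool.and_true, List.cons.injEq, true_and]
          exact ih hndl' hRl'
      · have hpa' : p a = false := by simpa using hpa
        simp only [List.filter_cons, hpa', Bool.false_eq_true, if_false, Bool.false_and]
        exact ih hndl' hRl'
  exact main (pvR groups) (by simpa [pvR] using PySem.List.nodup_pyRange_one 0 (groups.length : Int)) (fun j hj => hj)

-- the whole groups list is its indices mapped through gof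
theorem groups_eq_map (groups : List (List Int)) :
    groups = (pvR groups).map (gof groups) := by
  exact (PySem.List.map_pyGetD_pyRange_zero' groups []).symm

-- the inverted index maps e to exactly the indices of groups containing e
theorem mem_idx {groups : List (List Int)} (e j : Int) :
    j ∈ (idxB groups).getD e [] ↔ (j ∈ pvR groups ∧ e ∈ gof groups j) := by
  have hflat : idxB groups
      = (((PySem.List.enumerate groups).flatMap (fun p => p.2.map (fun x => (x, p.1)))).foldl
          (fun d q => d.modify q.1 [] (fun l => l ++ [q.2])) PySem.Dict.empty) := by
    rw [List.foldl_flatMap]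
    unfold idxB
    congr 1
    funext d p
    rw [List.foldl_map]
  rw [hflat, PySem.Dict.getD_foldl_modify_append]
  rw [PySem.Dict.getD_empty, List.nil_append]
  constructor
  · intro hj
    rcases List.mem_map.mp hj with ⟨q, hqf, rfl⟩
    rcases List.mem_filter.mp hqf with ⟨hqL, hbeq⟩
    rcases List.mem_flatMap.mp hqL with ⟨p, hp, hqp⟩
    rcases List.mem_map.mp hqp with ⟨x, hx, rfl⟩
    rcases (PySem.List.mem_enumerate_iff groups 0 p).mp hp with ⟨k, hk, rfl⟩
    simp only at hx hbeq ⊢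
    have hxe : x = e := by simpa using hbeq
    subst hxe
    have hjR : ((0 : Int) + (k : Int)) ∈ pvR groups := mem_pvR.mpr (by constructor <;> omega)
    refine ⟨hjR, ?_⟩
    rw [gof_eq hjR]
    have : ((0 : Int) + (k : Int)).toNat = k := by omega
    simp only [this]
    exact hx
  · rintro ⟨hjR, he⟩
    rcases mem_pvR.mp hjR with ⟨hj0, hj1⟩
    have hklt : j.toNat < groups.length := by omega
    have hp : ((j : Int), groups[j.toNat]'hklt) ∈ PySem.List.enumerate groups 0 := by
      rw [PySem.List.mem_enumerate_iff]
      exact ⟨j.toNat, hklt, by rw [Prod.mk.injEq]; exact ⟨by omega, rfl⟩⟩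
    have hin : (e, j) ∈ (PySem.List.enumerate groups).flatMap (fun p => p.2.map (fun x => (x, p.1))) := by
      apply List.mem_flatMap.mpr
      refine ⟨((j : Int), groups[j.toNat]'hklt), hp, ?_⟩
      apply List.mem_map.mpr
      refine ⟨e, ?_, rfl⟩
      rw [gof_eq hjR] at he
      exact he
    apply List.mem_map.mpr
    exact ⟨(e, j), List.mem_filter.mpr ⟨hin, by simp⟩, rfl⟩

-- B's neighbour list at i ∈ range is exactly the adjacency filter
theorem nbrs_char {groups : List (List Int)} {i : Int} (hi : i ∈ pvR groups) :
    PySem.List.pyGetD (nbrsB groups) i [] = adjI groups i := by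
  rcases mem_pvR.mp hi with ⟨hi0, hi1⟩
  have hlen : (nbrsB groups).length = groups.length := by simp [nbrsB]
  rw [PySem.List.pyGetD_eq_getElem (nbrsB groups) [] hi0 (by rw [hlen]; exact_mod_cast hi1)]
  have hget : (nbrsB groups)[i.toNat]'(by rw [hlen]; omega)
      = PySem.List.sorted (PySem.Set.ofList
          ((gof groups i).flatMap (fun e => (idxB groups).getD e []))) (fun x => x) false := by
    simp only [nbrsB, List.getElem_map]
    rw [gof_eq hi]
  rw [hget]
  apply PySem.List.sorted_eq_of_perm_of_pairwise_lt
  · unfold adjI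
    rw [List.perm_ext_iff_of_nodup
      (List.Nodup.filter _ (by simpa [pvR] using PySem.List.nodup_pyRange_one 0 (groups.length : Int)))
      (PySem.Set.nodup_ofList _)]
    intro a
    rw [List.mem_filter]
    rw [PySem.Set.mem_ofList, List.mem_flatMap]
    constructor
    · rintro ⟨haR, hint⟩
      have hint' : pvInter (gof groups i) (gof groups a) = true := by simpa using hint
      rcases List.any_eq_true.mp hint' with ⟨e, he, hc⟩
      exact ⟨e, he, (mem_idx e a).mpr ⟨haR, by simpa using hc⟩⟩
    · rintro ⟨e, he, hmem⟩
      rcases (mem_idx e a).mp hmem with ⟨haR, hea⟩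
      refine ⟨haR, ?_⟩
      simp only [pvInter]
      have : (gof groups i).any (fun x => (gof groups a).contains x) = true :=
        List.any_eq_true.mpr ⟨e, he, by simpa using hea⟩
      simpa using this
  · exact List.Pairwise.filter _ (by simpa [pvR] using PySem.List.pairwise_lt_pyRange_one 0 (groups.length : Int))

-- dfsB only ever adds to seen
theorem dfs_mono (nbrs : List (List Int)) :
    ∀ f i sp, ∀ x ∈ (sp : List Int × List Int).1, x ∈ (dfsB nbrs f i sp).1 := by
  intro f
  induction f with
  | zero => intro i sp x hx; simpa [dfsB] using hx
  | succ f ih =>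
    intro i sp x hx
    simp only [dfsB]
    by_cases hc : sp.1.contains i = true
    · simp only [if_pos hc]; exact hx
    · have hfold : ∀ (l : List Int) (sp' : List Int × List Int), x ∈ sp'.1 →
          x ∈ (l.foldl (fun s j => dfsB nbrs f j s) sp').1 := by
        intro l
        induction l with
        | nil => intro sp' h; simpa using h
        | cons a l' ihl => intro sp' h; exact ihl _ (ih a sp' x h)
      rw [if_neg hc]
      exact hfold _ _ ((PySem.Set.mem_add sp.1 i x).mpr (Or.inl hx))

theorem dfs_fold_mono (nbrs : List (List Int)) (f : Nat) :
    ∀ (l : List Int) (sp : List Int × List Int), ∀ x ∈ sp.1,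
      x ∈ (l.foldl (fun s j => dfsB nbrs f j s) sp).1 := by
  intro l
  induction l with
  | nil => intro sp x h; simpa using h
  | cons a l' ihl => intro sp x h; exact ihl _ x (dfs_mono nbrs f a sp x h)

theorem dfs_mem_seen (nbrs : List (List Int)) (f : Nat) (hf : 0 < f) (i : Int)
    (sp : List Int × List Int) : i ∈ (dfsB nbrs f i sp).1 := by
  obtain ⟨f, rfl⟩ : ∃ f', f = f' + 1 := ⟨f - 1, by omega⟩
  simp only [dfsB]
  by_cases hc : sp.1.contains i = true
  · rw [if_pos hc]; simpa using hc
  · rw [if_neg hc]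
    exact dfs_fold_mono nbrs f _ _ i ((PySem.Set.mem_add sp.1 i i).mpr (Or.inr rfl))

theorem filter_length_le {p q : Int → Bool} (hsub : ∀ x, q x = true → p x = true) :
    ∀ (l : List Int), (l.filter q).length ≤ (l.filter p).length := by
  intro l
  induction l with
  | nil => simp
  | cons a l' ih =>
    simp only [List.filter_cons]
    cases hq : q a
    · cases hp : p a <;> simp <;> omega
    · rw [hsub a hq]; simpa using ih

theorem filter_length_lt {p q : Int → Bool} (hsub : ∀ x, q x = true → p x = true)
    {j : Int} : ∀ (l : List Int), j ∈ l → p j = true → q j = false →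
    (l.filter q).length < (l.filter p).length := by
  intro l
  induction l with
  | nil => intro h; cases h
  | cons a l' ih =>
    intro hj hpj hqj
    simp only [List.filter_cons]
    cases hq : q a
    · cases hp : p a
      · have haj : a ≠ j := fun he => by rw [he, hpj] at hp; cases hp
        have : j ∈ l' := by rcases List.mem_cons.mp hj with h | h; exact absurd h.symm haj; exact h
        simpa [hp] using ih this hpj hqj
      · have := filter_length_le hsub l'
        simp only [hq, hp]
        simp
        omega
    · have hp := hsub a hq
      have haj : a ≠ j := fun he => by rw [he, hqj] at hq; cases hq
      have : j ∈ l' := by rcases List.mem_cons.mp hj with h | h; exact absurd h.symm haj; exact h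
      have := ih this hpj hqj
      simp only [hq, hp]
      simp
      omega

-- the inner for-loop: A's scan over all groups filtered to neighbours mirrors B's
-- fold over the precomputed neighbour list
theorem loop_sim (groups : List (List Int)) (f : Nat)
    (IH : ∀ (i : Int) st seen order T, i ∈ pvR groups → SimInv groups st seen order T →
      SimInv groups (visitA groups f (gof groups i) st)
        (dfsB (nbrsB groups) f i (seen, order)).1
        (dfsB (nbrsB groups) f i (seen, order)).2 T) :
    ∀ (l : List Int), (∀ j ∈ l, j ∈ pvR groups) →
      ∀ st seen order T, SimInv groups st seen order T →
      SimInv groups (l.foldl (fun s j => visitA groups f (gof groups j) s) st)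
        (l.foldl (fun sp j => dfsB (nbrsB groups) f j sp) (seen, order)).1
        (l.foldl (fun sp j => dfsB (nbrsB groups) f j sp) (seen, order)).2 T := by
  intro l
  induction l with
  | nil => intro _ st seen order T h; exact h
  | cons a l' ih =>
    intro hR st seen order T h
    have ha := hR a List.mem_cons_self
    have h' := IH a st seen order T ha h
    have hnext := ih (fun j hj => hR j (List.mem_cons_of_mem _ hj))
      (visitA groups f (gof groups a) st)
      (dfsB (nbrsB groups) f a (seen, order)).1
      (dfsB (nbrsB groups) f a (seen, order)).2 T h'
    simpa using hnext

-- core simulation: one visit of A mirrors one dfs of B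
theorem sim (groups : List (List Int)) (hpre : Pre_topological_sort_groups groups) :
    ∀ f (i : Int) st seen order T, i ∈ pvR groups → SimInv groups st seen order T →
      SimInv groups (visitA groups f (gof groups i) st)
        (dfsB (nbrsB groups) f i (seen, order)).1
        (dfsB (nbrsB groups) f i (seen, order)).2 T := by
  intro f
  induction f with
  | zero => intro i st seen order T _ h; exact h
  | succ f ih =>
    intro i st seen order T hi hInv
    have hc1 : st.marked.any (fun m => pvSetEq (gof groups i) m) = order.contains i := by
      rw [hInv.mar]; exact pv_any_eq hpre hi hInv.ordR
    have hc2 : st.tempmark.any (fun m => pvSetEq (gof groups i) m) = T.contains i := by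
      rw [hInv.tmp]; exact pv_any_eq hpre hi hInv.tR
    by_cases hio : i ∈ order ∨ i ∈ T
    · -- already visited on both sides: both return their state unchanged
      have hseen : seen.contains i = true := by
        simpa using (hInv.seen_iff i).mpr hio
      have hA : visitA groups (f + 1) (gof groups i) st = st := by
        simp only [visitA]
        by_cases h1 : i ∈ order
        · rw [if_pos (by rw [hc1]; simpa using h1)]
        · have h2 : i ∈ T := hio.resolve_left h1
          rw [if_neg (by rw [hc1]; simpa using h1), if_pos (by rw [hc2]; simpa using h2)]
      have hB : dfsB (nbrsB groups) (f + 1) i (seen, order) = (seen, order) := by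
        simp only [dfsB]
        rw [if_pos hseen]
      rw [hA, hB]
      exact hInv
    · -- entering the node
      rw [not_or] at hio
      obtain ⟨hio1, hio2⟩ := hio
      have hiseen : i ∉ seen := fun h => (by
        rcases (hInv.seen_iff i).mp h with h | h
        exacts [hio1 h, hio2 h])
      have hcs : seen.contains i = false := by simpa using hiseen
      have hA : visitA groups (f + 1) (gof groups i) st
          = (let st1 : StA := ⟨pvRemoveFirst (gof groups i) st.unmarked, st.marked,
              st.tempmark ++ [gof groups i], st.res⟩
             let st2 := groups.foldl (fun s gn =>
               if pvInter (gof groups i) gn then visitA groups f gn s else s) st1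
             ⟨st2.unmarked, st2.marked ++ [gof groups i],
              pvRemoveFirst (gof groups i) st2.tempmark, gof groups i :: st2.res⟩) := by
        simp only [visitA]
        rw [if_neg (by rw [hc1]; simpa using hio1), if_neg (by rw [hc2]; simpa using hio2)]
      have hB : dfsB (nbrsB groups) (f + 1) i (seen, order)
          = (let sp1 : List Int × List Int := (PySem.Set.add seen i, order)
             let sp2 := (PySem.List.pyGetD (nbrsB groups) i []).foldl
               (fun s j => dfsB (nbrsB groups) f j s) sp1
             (sp2.1, sp2.2 ++ [i])) := by
        simp only [dfsB]
        rw [if_neg (by simp [hcs, hiseen])]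
      rw [hA, hB]
      simp only
      have hadd : PySem.Set.add seen i = seen ++ [i] := by
        simp [PySem.Set.add, hcs, hiseen]
      -- invariant for the entered state
      have hInvE : SimInv groups
          ⟨pvRemoveFirst (gof groups i) st.unmarked, st.marked,
            st.tempmark ++ [gof groups i], st.res⟩
          (seen ++ [i]) order (T ++ [i]) := by
        refine ⟨?_, hInv.mar, ?_, hInv.res, ?_, hInv.nd_order, ?_, ?_, hInv.ordR, ?_⟩
        · dsimp only
          rw [hInv.unm, pv_removeFirst_filter hpre hi _ (by simpa using hiseen)]
          congr 1
          apply List.filter_congr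
          intro x _
          by_cases hxi : x = i <;> simp [hxi]
        · dsimp only
          rw [hInv.tmp, List.map_append, List.map_cons, List.map_nil]
        · intro j
          simp only [List.mem_append, List.mem_singleton]
          rw [show (j ∈ seen ∨ j = i) ↔ (j ∈ order ∨ (j ∈ T ∨ j = i)) from by
            rw [hInv.seen_iff j]; tauto]
        · rw [List.nodup_append]
          refine ⟨hInv.nd_T, List.nodup_singleton _, ?_⟩
          intro a ha b hb
          rw [List.mem_singleton] at hb
          subst hb
          exact fun he => hio2 (he ▸ ha)
        · intro j hj
          simp only [List.mem_append, List.mem_singleton, not_or]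
          exact ⟨hInv.disj j hj, fun he => hio1 (he ▸ hj)⟩
        · intro j hj
          rcases List.mem_append.mp hj with h | h
          · exact hInv.tR j h
          · rw [List.mem_singleton.mp h]; exact hi
      -- rewrite A's scan over groups into a fold over the adjacency indices
      have hAloop : ∀ (st1 : StA),
          groups.foldl (fun s gn =>
            if pvInter (gof groups i) gn then visitA groups f gn s else s) st1
          = (adjI groups i).foldl (fun s j => visitA groups f (gof groups j) s) st1 := by
        intro st1
        have h1 := congrArg (fun L => List.foldl (fun s gn =>
          if pvInter (gof groups i) gn then visitA groups f gn s else s) st1 L)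
          (groups_eq_map groups)
        simp only at h1
        rw [h1, List.foldl_map]
        rw [PySem.List.foldl_if_eq_foldl_filter
          (fun j => pvInter (gof groups i) (gof groups j))
          (fun s j => visitA groups f (gof groups j) s) (pvR groups) st1]
        rfl
      rw [hAloop, nbrs_char hi, hadd]
      have hL := loop_sim groups f ih (adjI groups i)
        (fun j hj => (List.mem_filter.mp hj).1)
        _ (seen ++ [i]) order (T ++ [i]) hInvE
      set stL := (adjI groups i).foldl (fun s j => visitA groups f (gof groups j) s)
        (⟨pvRemoveFirst (gof groups i) st.unmarked, st.marked,
          st.tempmark ++ [gof groups i], st.res⟩ : StA) with hstL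
      set spL := (adjI groups i).foldl (fun sp j => dfsB (nbrsB groups) f j sp)
        (seen ++ [i], order) with hspL
      -- finish: A pops tempmark, appends to marked, prepends to res; B appends to order
      have hiT' : i ∉ T := hio2
      refine ⟨?_, ?_, ?_, ?_, ?_, ?_, ?_, ?_, ?_, ?_⟩
      · exact hL.unm
      · rw [hL.mar, List.map_append, List.map_cons, List.map_nil]
      · rw [hL.tmp]
        exact pv_removeFirst_snoc hpre hi hInv.tR hiT'
      · rw [hL.res]
        simp [List.reverse_append]
      · intro j
        rw [hL.seen_iff j]
        simp only [List.mem_append, List.mem_singleton]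
        tauto
      · rw [List.nodup_append]
        refine ⟨hL.nd_order, List.nodup_singleton _, ?_⟩
        have hni : i ∉ spL.2 := fun hmem =>
          (hL.disj i hmem) (List.mem_append.mpr (Or.inr List.mem_cons_self))
        intro a ha b hb
        rw [List.mem_singleton] at hb
        subst hb
        exact fun he => hni (he ▸ ha)
      · exact hInv.nd_T
      · intro j hj
        rcases List.mem_append.mp hj with h | h
        · intro hT
          exact hL.disj j h (List.mem_append.mpr (Or.inl hT))
        · rw [List.mem_singleton.mp h]; exact hiT'
      · intro j hj
        rcases List.mem_append.mp hj with h | h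
        · exact hL.ordR j h
        · rw [List.mem_singleton.mp h]; exact hi
      · exact hInv.tR

-- top loop: A's while over unmarked tracks B's for-loop over the remaining indices
theorem top_sim (groups : List (List Int)) (hpre : Pre_topological_sort_groups groups) :
    ∀ (l : List Int) (fuel : Nat) (st : StA) (seen order : List Int),
      SimInv groups st seen order [] →
      (∀ j ∈ l, j ∈ pvR groups) →
      (pvR groups).filter (fun j => !seen.contains j)
        = l.filter (fun j => !seen.contains j) →
      ((pvR groups).filter (fun j => !seen.contains j)).length ≤ fuel →
      whileA groups fuel st
        = ((l.foldl (fun sp i => dfsB (nbrsB groups) (groups.length + 1) i sp)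
            (seen, order)).2).reverse.map (gof groups) := by
  intro l
  induction l with
  | nil =>
    intro fuel st seen order hInv _ hfe _
    have hempty : (pvR groups).filter (fun j => !seen.contains j) = [] := by
      simpa using hfe
    have hu : st.unmarked = [] := by rw [hInv.unm, hempty]; rfl
    have hres : whileA groups fuel st = st.res := by
      cases fuel with
      | zero => rfl
      | succ f => simp only [whileA]; rw [hu]
    rw [hres, hInv.res]
    rfl
  | cons j l' ih =>
    intro fuel st seen order hInv hR hfe hlen
    have hjR := hR j List.mem_cons_self
    by_cases hjs : j ∈ seen
    · -- B's dfs returns immediately; A's while loop has not moved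
      have hcontains : seen.contains j = true := by simpa using hjs
      have hstep : dfsB (nbrsB groups) (groups.length + 1) j (seen, order) = (seen, order) := by
        simp only [dfsB]
        rw [if_pos hcontains]
      have hfe' : (pvR groups).filter (fun p => !seen.contains p)
          = l'.filter (fun p => !seen.contains p) := by
        rw [hfe]
        simp only [List.filter_cons, hcontains, Bool.not_true, Bool.false_eq_true, if_false]
      rw [List.foldl_cons, hstep]
      exact ih fuel st seen order hInv (fun x hx => hR x (List.mem_cons_of_mem _ hx)) hfe' hlen
    · -- a fresh root: A visits unmarked[0] = groups[j], B runs dfs(j)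
      have hcontains : seen.contains j = false := by simpa using hjs
      have hfilter_cons : (pvR groups).filter (fun p => !seen.contains p)
          = j :: l'.filter (fun p => !seen.contains p) := by
        rw [hfe]
        simp only [List.filter_cons, hcontains, Bool.not_false, if_pos]
      have hu : st.unmarked
          = gof groups j :: (l'.filter (fun p => !seen.contains p)).map (gof groups) := by
        rw [hInv.unm, hfilter_cons]; rfl
      obtain ⟨f, rfl⟩ : ∃ f', fuel = f' + 1 := by
        refine ⟨fuel - 1, ?_⟩
        have h1 : 1 ≤ ((pvR groups).filter (fun p => !seen.contains p)).length := by
          rw [hfilter_cons]; simp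
        omega
      have hwhile : whileA groups (f + 1) st
          = whileA groups f (visitA groups (groups.length + 1) (gof groups j) st) := by
        simp only [whileA]
        rw [hu]
      have hsim := sim groups hpre (groups.length + 1) j st seen order [] hjR hInv
      set sp' := dfsB (nbrsB groups) (groups.length + 1) j (seen, order) with hsp
      have hmono : ∀ x ∈ seen, x ∈ sp'.1 := fun x hx =>
        dfs_mono (nbrsB groups) (groups.length + 1) j (seen, order) x hx
      have hjseen' : j ∈ sp'.1 :=
        dfs_mem_seen (nbrsB groups) (groups.length + 1) (by omega) j (seen, order)
      have hsub : ∀ x, (!sp'.1.contains x) = true → (!seen.contains x) = true := by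
        intro x hx
        simp only [Bool.not_eq_true', List.contains_eq_mem, decide_eq_false_iff_not] at hx ⊢
        exact fun hxs => hx (hmono x hxs)
      have hfilter2 : ∀ (L : List Int), L.filter (fun p => !sp'.1.contains p)
          = (L.filter (fun p => !seen.contains p)).filter (fun p => !sp'.1.contains p) := by
        intro L
        rw [List.filter_filter]
        apply List.filter_congr
        intro x _
        cases hx : (!sp'.1.contains x)
        · simp
        · rw [hsub x hx]; simp
      have hfe'' : (pvR groups).filter (fun p => !sp'.1.contains p)
          = l'.filter (fun p => !sp'.1.contains p) := by
        rw [hfilter2 (pvR groups), hfilter_cons]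
        simp only [List.filter_cons]
        rw [show (!sp'.1.contains j) = false by simpa using hjseen']
        simp only [Bool.false_eq_true, if_false]
        rw [← hfilter2 l']
      have hlen' : ((pvR groups).filter (fun p => !sp'.1.contains p)).length ≤ f := by
        have hstrict := filter_length_lt (p := fun p => !seen.contains p)
          (q := fun p => !sp'.1.contains p) hsub (pvR groups) hjR
          (by show (!seen.contains j) = true; rw [hcontains]; rfl)
          (by show (!sp'.1.contains j) = false; simpa using hjseen')
        omega
      have hrec := ih f (visitA groups (groups.length + 1) (gof groups j) st) sp'.1 sp'.2
        hsim (fun x hx => hR x (List.mem_cons_of_mem _ hx)) hfe'' hlen'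
      rw [hwhile, List.foldl_cons, ← hsp]
      rw [show sp' = (sp'.1, sp'.2) from rfl] 
      exact hrec

-- ===== VERDICT (by name: the statement is the Claim_ definition above) =====
theorem topological_sort_groups_spec : Claim_equal_topological_sort_groups := by
  intro groups _ hpre
  unfold Spec_topological_sort_groups topological_sort_groups topological_sort_groups_alt
  have h0 : SimInv groups ⟨groups, [], [], []⟩ [] [] [] := by
    refine ⟨?_, rfl, rfl, rfl, by simp, List.nodup_nil, List.nodup_nil, by simp, by simp, by simp⟩
    simpa using groups_eq_map groups
  have := top_sim groups hpre (pvR groups) groups.length ⟨groups, [], [], []⟩ [] []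
    h0 (fun j hj => hj) rfl (by simp [pvR, PySem.List.length_pyRange_one])
  simpa [pvR, gof] using this
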